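-- pv_equiv track=rewrite | github.com/Rhuth28/ai-native-compliance-intelligence | app/risk.py | score_signals
-- ===== SOURCE A (Python) =====
-- from typing import Dict, Any, List, Tuple
--
-- SIGNAL_WEIGHTS: Dict[str, int] = {
--     "NEW_DEVICE_LOGIN": 25,
--     "PROFILE_CHANGE": 15,
--     "LARGE_TRANSACTION": 25,
--     "NEW_PAYEE_LARGE_TRANSFER": 30,
--     "PROFILE_CHANGE_AND_TRANSFER_24H": 35,
-- }
--
-- def score_signals(signals: List[Dict[str, Any]]) -> Tuple[int, Dict[str, int], List[str]]:
--
--     breakdown: Dict[str, int] = {}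
--     fired: List[str] = []  # for each fired signal
--
--     #Loop through each signal and its weight
--     for s in signals:
--         name = s.get("signal_name", "UNKNOWN_SIGNAL")   # if the signal is unknown--to prevent crashes
--         points = SIGNAL_WEIGHTS.get(name, 5)  # Unknown signals will be assigned small default weight
--
--         # Add the weight for each signal that occurred to breakdown dict
--         breakdown[name] = breakdown.get(name, 0) + points  #Duplicate signals will increase score
--         fired.append(name)   #Collect all the signals that was fired
--
--     total_score = sum(breakdown.values())  #Sums all weight
--     fired_deduped = sorted(list(set(fired)))   # Sort the fired list incase to return unique signals
--     return total_score, breakdown, fired_deduped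
-- ===== SOURCE B (Python) =====
-- from typing import Dict, Any, List, Tuple
--
-- SIGNAL_WEIGHTS: Dict[str, int] = {
--     "NEW_DEVICE_LOGIN": 25,
--     "PROFILE_CHANGE": 15,
--     "LARGE_TRANSACTION": 25,
--     "NEW_PAYEE_LARGE_TRANSFER": 30,
--     "PROFILE_CHANGE_AND_TRANSFER_24H": 35,
-- }
--
-- def score_signals(signals: List[Dict[str, Any]]) -> Tuple[int, Dict[str, int], List[str]]:
--     # Extract the names, then build breakdown per DISTINCT name (first occurrences,
--     # in order) by scanning the name list with list.count: duplicates contribute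
--     # count * weight, so no accumulator dict is needed at all.
--     names = [s.get("signal_name", "UNKNOWN_SIGNAL") for s in signals]
--     breakdown = {n: names.count(n) * SIGNAL_WEIGHTS.get(n, 5)
--                  for i, n in enumerate(names) if n not in names[:i]}
--     return sum(breakdown.values()), breakdown, sorted(breakdown)
-- ===== Notes on version B (the rewrite author's own statement) =====
-- stated objective: alternative
-- what changed: Drops A's incremental accumulator dict and fired list entirely: B builds breakdown directly per distinct name (first occurrences kept by an 'n not in names[:i]' scan) with contribution names.count(n)*weight, trading A's single O(n) accumulation pass for a scan-per-distinct-name shape.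
import Mathlib
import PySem

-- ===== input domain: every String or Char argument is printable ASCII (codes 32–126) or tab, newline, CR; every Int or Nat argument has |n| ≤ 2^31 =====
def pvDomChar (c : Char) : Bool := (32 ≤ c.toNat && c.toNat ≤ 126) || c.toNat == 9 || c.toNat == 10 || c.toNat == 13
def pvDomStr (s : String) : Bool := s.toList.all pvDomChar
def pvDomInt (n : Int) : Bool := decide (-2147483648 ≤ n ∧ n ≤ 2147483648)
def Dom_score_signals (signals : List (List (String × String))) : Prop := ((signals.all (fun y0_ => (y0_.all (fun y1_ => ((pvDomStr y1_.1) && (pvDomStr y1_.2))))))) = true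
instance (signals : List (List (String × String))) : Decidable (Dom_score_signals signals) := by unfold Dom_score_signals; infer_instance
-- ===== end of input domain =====

-- B drops A's accumulator dict and fired list: it builds breakdown per distinct name
-- (first occurrences kept by an 'n not in names[:i]' test) as count*weight; objective: alternative.


-- ===== PORT A =====
-- SIGNAL_WEIGHTS (module constant, shared by both programs)
def pvWeights : PySem.Dict String Int := PySem.Dict.ofList
  [("NEW_DEVICE_LOGIN", 25), ("PROFILE_CHANGE", 15), ("LARGE_TRANSACTION", 25),
   ("NEW_PAYEE_LARGE_TRANSFER", 30), ("PROFILE_CHANGE_AND_TRANSFER_24H", 35)]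

def score_signals (signals : List (List (String × String))) : Int × (List (String × Int)) × List String :=
  let st := signals.foldl (fun (st : PySem.Dict String Int × List String) s =>
      let name := (PySem.Dict.mk s).getD "signal_name" "UNKNOWN_SIGNAL"
      let points := pvWeights.getD name 5
      (st.1.insert name (st.1.getD name 0 + points), st.2 ++ [name]))
    (PySem.Dict.empty, [])
  let total_score := st.1.values.sum
  let fired_deduped := PySem.List.sorted (PySem.Set.ofList st.2) (fun x => x) false
  (total_score, st.1.items, fired_deduped)

-- ===== PORT B =====
def score_signals_alt (signals : List (List (String × String))) : Int × (List (String × Int)) × List String :=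
  let names := signals.map (fun s => (PySem.Dict.mk s).getD "signal_name" "UNKNOWN_SIGNAL")
  let breakdown := PySem.Dict.mk
    (((PySem.List.enumerate names).filter
        (fun p => !((PySem.List.slice names none (some p.1)).contains p.2))).map
      (fun p => (p.2, (names.count p.2 : Int) * pvWeights.getD p.2 5)))
  (breakdown.values.sum, breakdown.items, PySem.List.sorted breakdown.keys (fun x => x) false)

-- ===== PRECONDITION & SPEC =====
def Spec_score_signals (signals : List (List (String × String))) (out : Int × (List (String × Int)) × List String) : Prop := out = score_signals_alt signals
instance (signals : List (List (String × String))) (out : Int × (List (String × Int)) × List String) : Decidable (Spec_score_signals signals out) := by unfold Spec_score_signals; infer_instance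

-- ===== CLAIM (what is proved, stated in full; the proofs are below) =====
def Claim_equal_score_signals : Prop := ∀ (signals : List (List (String × String))), Dom_score_signals signals → Spec_score_signals signals (score_signals signals)

-- ===== LEMMAS AND PROOFS =====

-- A's fold over the pair (breakdown, fired) splits: the dict part is a weighted-counter
-- fold over the list of extracted names, and the fired list is exactly that name list.
theorem pv_foldA_split (signals : List (List (String × String)))
    (d : PySem.Dict String Int) (f : List String) :
    signals.foldl (fun (st : PySem.Dict String Int × List String) s =>
        let name := (PySem.Dict.mk s).getD "signal_name" "UNKNOWN_SIGNAL"
        let points := pvWeights.getD name 5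
        (st.1.insert name (st.1.getD name 0 + points), st.2 ++ [name])) (d, f)
    = ((signals.map (fun s => (PySem.Dict.mk s).getD "signal_name" "UNKNOWN_SIGNAL")).foldl
         (fun d n => d.insert n (d.getD n 0 + pvWeights.getD n 5)) d,
       f ++ signals.map (fun s => (PySem.Dict.mk s).getD "signal_name" "UNKNOWN_SIGNAL")) := by
  induction signals generalizing d f with
  | nil => simp
  | cons s rest ih => simp [ih]

-- The weighted-counter fold, characterised by its items list: first occurrences in
-- order, each name paired with its count times its weight.
theorem pv_wfold_items (ns : List String) :
    (ns.foldl (fun d n => d.insert n (d.getD n 0 + pvWeights.getD n 5)) PySem.Dict.empty).items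
    = (PySem.Set.ofList ns).map (fun k => (k, (ns.count k : Int) * pvWeights.getD k 5)) := by
  induction ns using List.reverseRecOn with
  | nil => simp [PySem.Set.ofList]; rfl
  | append_singleton ns n ih =>
    rw [List.foldl_append, List.foldl_cons, List.foldl_nil]
    have hkeys : (ns.foldl (fun d n => d.insert n (d.getD n 0 + pvWeights.getD n 5)) PySem.Dict.empty).keys
        = PySem.Set.ofList ns := by
      rw [PySem.Dict.keys_foldl_insert]
      simp [PySem.Set.update_nil_left]
    have hnd : (ns.foldl (fun d n => d.insert n (d.getD n 0 + pvWeights.getD n 5)) PySem.Dict.empty).keys.Nodup :=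
      PySem.Dict.nodup_keys_foldl_insert _ _ _ PySem.Dict.nodup_keys_empty
    set D := ns.foldl (fun d n => d.insert n (d.getD n 0 + pvWeights.getD n 5)) PySem.Dict.empty with hD
    by_cases hmem : n ∈ ns
    · have hc : D.contains n = true := by
        rw [PySem.Dict.contains_eq_decide_mem_keys, hkeys]
        simp [PySem.Set.mem_ofList, hmem]
      have hget : D.getD n 0 = (ns.count n : Int) * pvWeights.getD n 5 := by
        apply PySem.Dict.getD_of_mem_items _ _ hnd
        rw [ih]
        exact List.mem_map_of_mem ((PySem.Set.mem_ofList _ _).mpr hmem)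
      rw [PySem.Dict.items_insert_of_contains _ _ hc, ih, hget]
      rw [PySem.Set.ofList_append_singleton, PySem.Set.add_of_mem ((PySem.Set.mem_ofList _ _).mpr hmem)]
      rw [List.map_map]
      apply List.map_congr_left
      intro k hk
      by_cases hkn : k = n
      · subst hkn
        simp [List.count_append]
        ring
      · have hbeq : (k == n) = false := by simp [hkn]
        simp only [Function.comp_apply, hbeq, List.count_append, List.count_singleton]
        have : ¬ (n = k) := fun h => hkn h.symm
        simp [this]
    · have hc : D.contains n = false := by
        rw [PySem.Dict.contains_eq_decide_mem_keys, hkeys]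
        simp [PySem.Set.mem_ofList, hmem]
      have hget : D.getD n 0 = 0 := PySem.Dict.getD_of_not_contains _ _ hc
      rw [PySem.Dict.items_insert_of_not_contains _ _ hc, ih, hget]
      rw [PySem.Set.ofList_append_singleton, PySem.Set.add_of_not_mem (by simpa [PySem.Set.mem_ofList] using hmem)]
      rw [List.map_append]
      congr 1
      · apply List.map_congr_left
        intro k hk
        have hkn : ¬ (n = k) := by rintro rfl; exact hmem ((PySem.Set.mem_ofList _ _).mp hk)
        simp [List.count_append, hkn]
      · have : n ∉ ns := hmem
        simp [List.count_eq_zero_of_not_mem this]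

-- B's first-occurrence filter over the enumeration IS set(ns) in first-occurrence order.
theorem pv_firstocc (ns : List String) :
    ((PySem.List.enumerate ns).filter
        (fun p => !((PySem.List.slice ns none (some p.1)).contains p.2))).map (fun p => p.2)
      = PySem.Set.ofList ns := by
  induction ns using List.reverseRecOn with
  | nil => simp [PySem.List.enumerate]
  | append_singleton ns n ih =>
    rw [PySem.List.enumerate_append, List.filter_append, List.map_append]
    have hfc : (PySem.List.enumerate ns).filter
        (fun p => !((PySem.List.slice (ns ++ [n]) none (some p.1)).contains p.2))
        = (PySem.List.enumerate ns).filter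
        (fun p => !((PySem.List.slice ns none (some p.1)).contains p.2)) := by
      apply List.filter_congr
      intro p hp
      obtain ⟨k, hk, rfl⟩ := (PySem.List.mem_enumerate_iff ns 0 p).mp hp
      simp only [Int.zero_add]
      rw [PySem.List.slice_to_natCast, PySem.List.slice_to_natCast,
        List.take_append_of_le_length (le_of_lt hk)]
    rw [hfc, ih]
    have hlast : PySem.List.enumerate [n] (0 + (ns.length : Int)) = [((ns.length : Int), n)] := by
      simp [PySem.List.enumerate]
    rw [hlast]
    have hsl : PySem.List.slice (ns ++ [n]) none (some ((ns.length : Int))) = ns := by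
      rw [PySem.List.slice_to_natCast]
      simp
    rw [PySem.Set.ofList_append_singleton, PySem.Set.add_eq_ite]
    by_cases hmem : n ∈ ns
    · simp [List.filter, hsl, hmem]
    · simp [List.filter, hsl, hmem]

-- B's breakdown list equals the weighted counter's items list.
theorem pv_blist (ns : List String) :
    ((PySem.List.enumerate ns).filter
        (fun p => !((PySem.List.slice ns none (some p.1)).contains p.2))).map
      (fun p => (p.2, (ns.count p.2 : Int) * pvWeights.getD p.2 5))
    = (PySem.Set.ofList ns).map (fun k => (k, (ns.count k : Int) * pvWeights.getD k 5)) := by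
  rw [← pv_firstocc ns, List.map_map]
  rfl

-- A's breakdown dict IS B's breakdown dict.
theorem pv_main (ns : List String) :
    ns.foldl (fun d n => d.insert n (d.getD n 0 + pvWeights.getD n 5)) PySem.Dict.empty
    = PySem.Dict.mk (((PySem.List.enumerate ns).filter
        (fun p => !((PySem.List.slice ns none (some p.1)).contains p.2))).map
      (fun p => (p.2, (ns.count p.2 : Int) * pvWeights.getD p.2 5))) := by
  apply PySem.Dict.ext
  rw [pv_wfold_items]
  exact (pv_blist ns).symm

-- The weighted-counter fold's keys are set(ns) in first-occurrence order.
theorem pv_keys (ns : List String) :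
    (ns.foldl (fun d n => d.insert n (d.getD n 0 + pvWeights.getD n 5)) PySem.Dict.empty).keys
    = PySem.Set.ofList ns := by
  rw [PySem.Dict.keys_foldl_insert]
  simp [PySem.Set.update_nil_left]

-- ===== VERDICT (by name: the statement is the Claim_ definition above) =====
theorem score_signals_spec : Claim_equal_score_signals := by
  intro signals _
  show score_signals signals = score_signals_alt signals
  simp only [score_signals, score_signals_alt]
  rw [pv_foldA_split, List.nil_append]
  dsimp only
  conv_rhs => rw [← pv_main]
  rw [pv_keys]
  refine Prod.ext rfl (Prod.ext ?_ rfl)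
  dsimp only
  rw [pv_wfold_items]
  exact (pv_blist _).symm
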